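-- pv_equiv track=rewrite | github.com/ariefkurniawan95/Capstone_Project | capstone.py | is_student_registered
-- ===== SOURCE A (Python) =====
-- students_db  = [
--     {
--         "NIS" : "202101",
--         "Nama" : "Arief Kurniawan",
--         "1": True, "semester1_matematika" : 100, "semester1_fisika" : 75, "semester1_kimia" : 85, "semester1_biologi" : 75,
--         "2": True, "semester2_matematika" : 100, "semester2_fisika" : 75, "semester2_kimia" : 85, "semester2_biologi" : 75,
--         "3": True, "semester3_matematika" : 100, "semester3_fisika" : 75, "semester3_kimia" : 85, "semester3_biologi" : 75,
--         "4": True, "semester4_matematika" : 100, "semester4_fisika" : 75, "semester4_kimia" : 85, "semester4_biologi" : 75,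
--         "5": True, "semester5_matematika" : 100, "semester5_fisika" : 75, "semester5_kimia" : 85, "semester5_biologi" : 75,
--         "6": True, "semester6_matematika" : 100, "semester6_fisika" : 75, "semester6_kimia" : 85, "semester6_biologi" : 75
--     },
--     {
--         "NIS" : "202102",
--         "Nama" : "Sharon Kurniawan",
--         "1": True, "semester1_matematika" : 100, "semester1_fisika" : 75, "semester1_kimia" : 85, "semester1_biologi" : 75,
--         "2": True, "semester2_matematika" : 100, "semester2_fisika" : 75, "semester2_kimia" : 85, "semester2_biologi" : 75,
--         "3": True, "semester3_matematika" : 100, "semester3_fisika" : 75, "semester3_kimia" : 85, "semester3_biologi" : 75,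
--         "4": True, "semester4_matematika" : 100, "semester4_fisika" : 75, "semester4_kimia" : 85, "semester4_biologi" : 75,
--         "5": True, "semester5_matematika" : 100, "semester5_fisika" : 75, "semester5_kimia" : 85, "semester5_biologi" : 75,
--         "6": True, "semester6_matematika" : 100, "semester6_fisika" : 75, "semester6_kimia" : 85, "semester6_biologi" : 75
--     },
--     {
--         "NIS" : "202103",
--         "Nama" : "Stephanie Anastasia",
--         "1": True, "semester1_matematika" : 100, "semester1_fisika" : 75, "semester1_kimia" : 85, "semester1_biologi" : 75,
--         "2": True, "semester2_matematika" : 100, "semester2_fisika" : 75, "semester2_kimia" : 85, "semester2_biologi" : 75,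
--         "3": True, "semester3_matematika" : 100, "semester3_fisika" : 75, "semester3_kimia" : 85, "semester3_biologi" : 75,
--         "4": True, "semester4_matematika" : 100, "semester4_fisika" : 75, "semester4_kimia" : 85, "semester4_biologi" : 75,
--         "5": True, "semester5_matematika" : 100, "semester5_fisika" : 75, "semester5_kimia" : 85, "semester5_biologi" : 75,
--         "6": True, "semester6_matematika" : 100, "semester6_fisika" : 75, "semester6_kimia" : 85, "semester6_biologi" : 75
--     },
--     {
--         "NIS" : "202104",
--         "Nama" : "Stella Windaya",
--         "1": True,"semester1_matematika" : 100, "semester1_fisika" : 75, "semester1_kimia" : 85, "semester1_biologi" : 75,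
--         "2": True,"semester2_matematika" : 100, "semester2_fisika" : 75, "semester2_kimia" : 85, "semester2_biologi" : 75,
--         "3": True,"semester3_matematika" : 100, "semester3_fisika" : 75, "semester3_kimia" : 85, "semester3_biologi" : 75,
--         "4": True,"semester4_matematika" : 100, "semester4_fisika" : 75, "semester4_kimia" : 85, "semester4_biologi" : 75,
--         "5": True,"semester5_matematika" : 100, "semester5_fisika" : 75, "semester5_kimia" : 85, "semester5_biologi" : 75,
--         "6": True,"semester6_matematika" : 100, "semester6_fisika" : 75, "semester6_kimia" : 85, "semester6_biologi" : 75
--     },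
--     {
--         "NIS" : "202105",
--         "Nama" : "Indah Windaya",
--         "1": True, "semester1_matematika" : 100, "semester1_fisika" : 75, "semester1_kimia" : 85, "semester1_biologi" : 75,
--         "2": True, "semester2_matematika" : 100, "semester2_fisika" : 75, "semester2_kimia" : 85, "semester2_biologi" : 75,
--         "3": True, "semester3_matematika" : 100, "semester3_fisika" : 75, "semester3_kimia" : 85, "semester3_biologi" : 75
--     }
-- ] #Database menggunakan dictionary dalam list
--
-- def is_student_registered(input_nis): #function untuk melakukan validasi apakah student studah terdaftar atau belum
--     flagger = False
--     counter = 0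
--     for i in range(len(students_db)):
--         for value in students_db[counter].values():
--             if input_nis == value :
--                 flagger = True #jika value sama dengan input nis maka merubah data bool dari false menjadi true
--                 break
--         counter+=1
--         if counter == len(students_db): #ketika nilai counter sama dengan panjang database maka break
--             break
--     return flagger        #if True then Student is found, else student is not found
-- ===== SOURCE B (Python) =====
-- students_db  = [
--     {
--         "NIS" : "202101",
--         "Nama" : "Arief Kurniawan",
--         "1": True, "semester1_matematika" : 100, "semester1_fisika" : 75, "semester1_kimia" : 85, "semester1_biologi" : 75,
--         "2": True, "semester2_matematika" : 100, "semester2_fisika" : 75, "semester2_kimia" : 85, "semester2_biologi" : 75,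
--         "3": True, "semester3_matematika" : 100, "semester3_fisika" : 75, "semester3_kimia" : 85, "semester3_biologi" : 75,
--         "4": True, "semester4_matematika" : 100, "semester4_fisika" : 75, "semester4_kimia" : 85, "semester4_biologi" : 75,
--         "5": True, "semester5_matematika" : 100, "semester5_fisika" : 75, "semester5_kimia" : 85, "semester5_biologi" : 75,
--         "6": True, "semester6_matematika" : 100, "semester6_fisika" : 75, "semester6_kimia" : 85, "semester6_biologi" : 75
--     },
--     {
--         "NIS" : "202102",
--         "Nama" : "Sharon Kurniawan",
--         "1": True, "semester1_matematika" : 100, "semester1_fisika" : 75, "semester1_kimia" : 85, "semester1_biologi" : 75,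
--         "2": True, "semester2_matematika" : 100, "semester2_fisika" : 75, "semester2_kimia" : 85, "semester2_biologi" : 75,
--         "3": True, "semester3_matematika" : 100, "semester3_fisika" : 75, "semester3_kimia" : 85, "semester3_biologi" : 75,
--         "4": True, "semester4_matematika" : 100, "semester4_fisika" : 75, "semester4_kimia" : 85, "semester4_biologi" : 75,
--         "5": True, "semester5_matematika" : 100, "semester5_fisika" : 75, "semester5_kimia" : 85, "semester5_biologi" : 75,
--         "6": True, "semester6_matematika" : 100, "semester6_fisika" : 75, "semester6_kimia" : 85, "semester6_biologi" : 75
--     },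
--     {
--         "NIS" : "202103",
--         "Nama" : "Stephanie Anastasia",
--         "1": True, "semester1_matematika" : 100, "semester1_fisika" : 75, "semester1_kimia" : 85, "semester1_biologi" : 75,
--         "2": True, "semester2_matematika" : 100, "semester2_fisika" : 75, "semester2_kimia" : 85, "semester2_biologi" : 75,
--         "3": True, "semester3_matematika" : 100, "semester3_fisika" : 75, "semester3_kimia" : 85, "semester3_biologi" : 75,
--         "4": True, "semester4_matematika" : 100, "semester4_fisika" : 75, "semester4_kimia" : 85, "semester4_biologi" : 75,
--         "5": True, "semester5_matematika" : 100, "semester5_fisika" : 75, "semester5_kimia" : 85, "semester5_biologi" : 75,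
--         "6": True, "semester6_matematika" : 100, "semester6_fisika" : 75, "semester6_kimia" : 85, "semester6_biologi" : 75
--     },
--     {
--         "NIS" : "202104",
--         "Nama" : "Stella Windaya",
--         "1": True,"semester1_matematika" : 100, "semester1_fisika" : 75, "semester1_kimia" : 85, "semester1_biologi" : 75,
--         "2": True,"semester2_matematika" : 100, "semester2_fisika" : 75, "semester2_kimia" : 85, "semester2_biologi" : 75,
--         "3": True,"semester3_matematika" : 100, "semester3_fisika" : 75, "semester3_kimia" : 85, "semester3_biologi" : 75,
--         "4": True,"semester4_matematika" : 100, "semester4_fisika" : 75, "semester4_kimia" : 85, "semester4_biologi" : 75,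
--         "5": True,"semester5_matematika" : 100, "semester5_fisika" : 75, "semester5_kimia" : 85, "semester5_biologi" : 75,
--         "6": True,"semester6_matematika" : 100, "semester6_fisika" : 75, "semester6_kimia" : 85, "semester6_biologi" : 75
--     },
--     {
--         "NIS" : "202105",
--         "Nama" : "Indah Windaya",
--         "1": True, "semester1_matematika" : 100, "semester1_fisika" : 75, "semester1_kimia" : 85, "semester1_biologi" : 75,
--         "2": True, "semester2_matematika" : 100, "semester2_fisika" : 75, "semester2_kimia" : 85, "semester2_biologi" : 75,
--         "3": True, "semester3_matematika" : 100, "semester3_fisika" : 75, "semester3_kimia" : 85, "semester3_biologi" : 75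
--     }
-- ]
--
-- # Sort-then-binary-search: the string argument can only ever equal one of the
-- # string values of the records, so collect those once, sort them, and answer a
-- # lookup with a hand-rolled binary search instead of scanning every value.
-- _values = sorted(v for rec in students_db for v in rec.values() if isinstance(v, str))
--
-- def is_student_registered(input_nis):
--     lo, hi = 0, len(_values)
--     while lo < hi:
--         mid = (lo + hi) // 2
--         if _values[mid] < input_nis:
--             lo = mid + 1
--         else:
--             hi = mid
--     return lo < len(_values) and _values[lo] == input_nis
-- ===== Notes on version B (the rewrite author's own statement) =====
-- stated objective: alternative
-- what changed: B replaces A's nested linear scan over every record value with a sort-then-binary-search lookup: the string values are collected and sorted once, and each query is answered by a hand-written binary search (a string argument can only equal a string value, so non-string values are dropped).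
import Mathlib
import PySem

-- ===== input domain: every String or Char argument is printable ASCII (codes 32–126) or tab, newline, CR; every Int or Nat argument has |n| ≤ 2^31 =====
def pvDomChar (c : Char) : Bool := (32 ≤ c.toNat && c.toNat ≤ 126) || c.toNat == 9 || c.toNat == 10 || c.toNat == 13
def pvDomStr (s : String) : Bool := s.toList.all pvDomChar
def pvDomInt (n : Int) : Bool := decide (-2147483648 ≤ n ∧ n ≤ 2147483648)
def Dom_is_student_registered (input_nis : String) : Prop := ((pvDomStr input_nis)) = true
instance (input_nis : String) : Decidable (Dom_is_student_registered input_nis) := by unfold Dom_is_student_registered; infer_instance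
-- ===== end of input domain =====

-- B sorts the DB's string values once and answers each query with a hand-written binary
-- search, replacing A's nested linear scan over every record value (objective: alternative).

-- A Python value occurring in students_db: a string, an int, or a bool.
inductive PyVal
  | s : String → PyVal
  | n : Int → PyVal
  | b : Bool → PyVal
deriving DecidableEq, Repr

-- the five semester value blocks [True, 100, 75, 85, 75] (dict keys are all distinct,
-- so .values() is just the literal values in insertion order)
def semBlock : List PyVal := [.b true, .n 100, .n 75, .n 85, .n 75]

-- students_db as the list of each record's .values() in insertion order
def students_db_values : List (List PyVal) :=
  [ [.s "202101", .s "Arief Kurniawan"] ++ semBlock ++ semBlock ++ semBlock ++ semBlock ++ semBlock ++ semBlock,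
    [.s "202102", .s "Sharon Kurniawan"] ++ semBlock ++ semBlock ++ semBlock ++ semBlock ++ semBlock ++ semBlock,
    [.s "202103", .s "Stephanie Anastasia"] ++ semBlock ++ semBlock ++ semBlock ++ semBlock ++ semBlock ++ semBlock,
    [.s "202104", .s "Stella Windaya"] ++ semBlock ++ semBlock ++ semBlock ++ semBlock ++ semBlock ++ semBlock,
    [.s "202105", .s "Indah Windaya"] ++ semBlock ++ semBlock ++ semBlock ]

-- ===== PORT A =====
-- inner loop: 'for value in …: if input_nis == value: flagger = True; break'
-- (a string compares equal only to an equal string value)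
def scanValues (input_nis : String) : List PyVal → Bool → Bool
  | [], flagger => flagger
  | v :: vs, flagger =>
      if PyVal.s input_nis = v then true else scanValues input_nis vs flagger

-- outer loop over range(len(students_db)) with state (flagger, counter, done);
-- 'done' records the trailing 'if counter == len: break' (it can only fire on the last
-- iteration, and db[counter] is always in range since counter tracks i)
def is_student_registered (input_nis : String) : Bool :=
  (PySem.List.pyRange 0 (Int.ofNat students_db_values.length) 1).foldl
    (fun (st : Bool × Int × Bool) _i =>
      if st.2.2 then st
      else
        let flagger := scanValues input_nis ((PySem.List.pyGet? students_db_values st.2.1).getD []) st.1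
        let counter := st.2.1 + 1
        (flagger, counter, counter == Int.ofNat students_db_values.length))
    (false, 0, false) |>.1

-- ===== PORT B =====
-- '_values = sorted(v for rec in students_db for v in rec.values() if isinstance(v, str))'
def string_values : List String :=
  (students_db_values.flatMap id).filterMap (fun v => match v with | .s s => some s | _ => none)

def sorted_values : List String := PySem.List.sorted string_values (fun v => v) false

-- the while loop: 'while lo < hi: mid = (lo+hi)//2; if _values[mid] < input_nis: lo = mid+1 else: hi = mid'
-- (lo, hi stay in 0..len, so Nat indices and getD are exact; Python str '<' is Lean String '<')
def bsLoop (x : String) (vals : List String) (lo hi : Nat) : Nat :=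
  if lo < hi then
    let mid := (lo + hi) / 2
    if vals.getD mid "" < x then bsLoop x vals (mid + 1) hi else bsLoop x vals lo mid
  else lo
termination_by hi - lo
decreasing_by all_goals omega

-- 'return lo < len(_values) and _values[lo] == input_nis'
def is_student_registered_alt (input_nis : String) : Bool :=
  let lo := bsLoop input_nis sorted_values 0 sorted_values.length
  decide (lo < sorted_values.length) && (sorted_values.getD lo "" == input_nis)

-- ===== PRECONDITION & SPEC =====
def Spec_is_student_registered (input_nis : String) (out : Bool) : Prop := out = is_student_registered_alt input_nis
instance (input_nis : String) (out : Bool) : Decidable (Spec_is_student_registered input_nis out) := by unfold Spec_is_student_registered; infer_instance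

-- ===== CLAIM =====
def Claim_equal_is_student_registered : Prop := ∀ (input_nis : String), Dom_is_student_registered input_nis → Spec_is_student_registered input_nis (is_student_registered input_nis)

-- ===== LEMMAS AND PROOFS =====

-- the inner scan of A sets the flag iff the record contains the string, else keeps it
theorem scanValues_eq (x : String) (vals : List PyVal) (f : Bool) :
    scanValues x vals f = (vals.any (fun v => PyVal.s x == v) || f) := by
  induction vals with
  | nil => simp [scanValues]
  | cons v vs ih =>
      by_cases h : PyVal.s x = v <;>
        simp [scanValues, h, ih, Bool.or_assoc]

@[simp] theorem pv_beq_s_s (x y : String) : (PyVal.s x == PyVal.s y) = (x == y) := by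
  by_cases h : x = y <;> simp [h]
@[simp] theorem pv_beq_s_n (x : String) (m : Int) : (PyVal.s x == PyVal.n m) = false := by simp
@[simp] theorem pv_beq_s_b (x : String) (c : Bool) : (PyVal.s x == PyVal.b c) = false := by simp

-- the sorted list of string values, named as a literal
def Svals : List String :=
  ["202101", "202102", "202103", "202104", "202105",
   "Arief Kurniawan", "Indah Windaya", "Sharon Kurniawan", "Stella Windaya", "Stephanie Anastasia"]

theorem Svals_pairwise : Svals.Pairwise (fun a b : String => a < b) := by
  have h : Svals.Pairwise (fun a b : String => a.toList < b.toList) := by decide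
  exact h.imp (fun hab => String.lt_iff_toList_lt.mpr hab)

theorem sorted_values_eq : sorted_values = Svals := by
  unfold sorted_values
  refine PySem.List.sorted_eq_of_perm_of_pairwise_lt string_values Svals (fun v => v) ?_ Svals_pairwise
  decide

-- binary-search loop invariant: everything left of the returned index is < x,
-- everything from it on (inside the list) is not
theorem bsLoop_inv (x : String) (l : List String)
    (hpw : l.Pairwise (fun a b : String => a < b)) :
    ∀ lo hi, lo ≤ hi → hi ≤ l.length →
      (∀ i, i < lo → l.getD i "" < x) →
      (∀ i, hi ≤ i → i < l.length → ¬ l.getD i "" < x) →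
      bsLoop x l lo hi ≤ l.length ∧
      (∀ i, i < bsLoop x l lo hi → l.getD i "" < x) ∧
      (∀ i, bsLoop x l lo hi ≤ i → i < l.length → ¬ l.getD i "" < x) := by
  intro lo hi
  induction lo, hi using bsLoop.induct x l with
  | case1 lo hi hlt mid hmv ih =>
      intro _ hhi hlow hhigh
      rw [bsLoop, if_pos hlt, if_pos hmv]
      refine ih (by omega) hhi ?_ hhigh
      intro i hi'
      by_cases hc : i < lo
      · exact hlow i hc
      · have hmidlen : mid < l.length := by omega
        have hilen : i < l.length := by omega
        by_cases hieq : i = mid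
        · subst hieq; exact hmv
        · have hlt' : l[i] < l[mid] :=
            (List.pairwise_iff_getElem.mp hpw) i mid hilen hmidlen (by omega)
          have : l.getD i "" < l.getD mid "" := by
            rwa [List.getD_eq_getElem l "" hilen, List.getD_eq_getElem l "" hmidlen]
          exact lt_trans this hmv
  | case2 lo hi hlt mid hmv ih =>
      intro _ hhi hlow hhigh
      rw [bsLoop, if_pos hlt, if_neg hmv]
      refine ih (by omega) (by omega) hlow ?_
      intro i hmi hilen
      have hmidlen : mid < l.length := by omega
      by_cases hieq : i = mid
      · subst hieq; exact hmv
      · intro hc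
        have hlt' : l[mid] < l[i] :=
          (List.pairwise_iff_getElem.mp hpw) mid i hmidlen hilen (by omega)
        have : l.getD mid "" < l.getD i "" := by
          rwa [List.getD_eq_getElem l "" hmidlen, List.getD_eq_getElem l "" hilen]
        exact hmv (lt_trans this hc)
  | case3 lo hi hnlt =>
      intro hlohi hhi hlow hhigh
      rw [bsLoop, if_neg hnlt]
      have : lo = hi := by omega
      subst this
      exact ⟨by omega, hlow, hhigh⟩

-- sort + binary search answers exactly membership among the sorted values
theorem str_beq_comm (a b : String) : (a == b) = (b == a) := by
  by_cases h : a = b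
  · subst h; rfl
  · have h' : ¬ b = a := fun hh => h hh.symm
    simp [h, h']

theorem alt_eq_any (x : String) :
    is_student_registered_alt x = Svals.any (fun v => x == v) := by
  have hpw : sorted_values.Pairwise (fun a b : String => a < b) := by
    rw [sorted_values_eq]; exact Svals_pairwise
  obtain ⟨hle, hlt, hge⟩ :=
    bsLoop_inv x sorted_values hpw 0 sorted_values.length (by omega) (le_refl _)
      (by omega) (by omega)
  set l := sorted_values with hl
  set r := bsLoop x l 0 l.length with hr
  have key : (decide (r < l.length) && (l.getD r "" == x)) = l.any (fun v => v == x) := by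
    by_cases h : r < l.length
    · by_cases he : l.getD r "" = x
      · have hbeq : (l.getD r "" == x) = true := beq_iff_eq.mpr he
        have h1 : (decide (r < l.length) && (l.getD r "" == x)) = true := by
          rw [hbeq]; simp [h]
        have h2 : l.any (fun v => v == x) = true := by
          rw [List.any_eq_true]
          refine ⟨l[r], l.getElem_mem h, ?_⟩
          rw [← List.getD_eq_getElem l "" h]
          exact hbeq
        rw [h1, h2]
      · have hbeq : (l.getD r "" == x) = false := beq_eq_false_iff_ne.mpr he
        have h1 : (decide (r < l.length) && (l.getD r "" == x)) = false := by
          rw [hbeq]; simp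
        have h2 : l.any (fun v => v == x) = false := by
          rw [List.any_eq_false]
          intro v hv hvx
          have hvx' : v = x := by simpa using hvx
          obtain ⟨i, hilen, hvi⟩ := List.mem_iff_getElem.mp hv
          have hvd : l.getD i "" = v := by rw [List.getD_eq_getElem l "" hilen]; exact hvi
          rcases lt_trichotomy i r with hc | hc | hc
          · have hx : l.getD i "" < x := hlt i hc
            rw [hvd, hvx'] at hx
            exact lt_irrefl x hx
          · subst hc
            exact he (hvd.trans hvx')
          · have h1' : ¬ l.getD r "" < x := hge r (le_refl _) h
            have hx_le : x ≤ l[r] := by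
              rw [← List.getD_eq_getElem l "" h]; exact not_lt.mp h1'
            have h2' : l[r] < l[i] := (List.pairwise_iff_getElem.mp hpw) r i h hilen hc
            have hxv : x < l[i] := lt_of_le_of_lt hx_le h2'
            rw [hvi, hvx'] at hxv
            exact lt_irrefl x hxv
        rw [h1, h2]
    · have h1 : (decide (r < l.length) && (l.getD r "" == x)) = false := by simp [h]
      have h2 : l.any (fun v => v == x) = false := by
        rw [List.any_eq_false]
        intro v hv hvx
        have hvx' : v = x := by simpa using hvx
        obtain ⟨i, hilen, hvi⟩ := List.mem_iff_getElem.mp hv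
        have hx : l.getD i "" < x := hlt i (by omega)
        rw [List.getD_eq_getElem l "" hilen, hvi, hvx'] at hx
        exact lt_irrefl x hx
      rw [h1, h2]
  calc is_student_registered_alt x
      = (decide (r < l.length) && (l.getD r "" == x)) := rfl
    _ = l.any (fun v => v == x) := key
    _ = Svals.any (fun v => v == x) := by rw [hl, sorted_values_eq]
    _ = Svals.any (fun v => x == v) := by
          rw [show (fun v => v == x) = (fun v => x == v) from funext fun v => str_beq_comm v x]

-- ===== VERDICT =====
set_option maxHeartbeats 1000000 in
theorem is_student_registered_spec : Claim_equal_is_student_registered := by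
  intro x _
  show is_student_registered x = is_student_registered_alt x
  rw [alt_eq_any]
  simp only [is_student_registered, students_db_values, semBlock]
  simp only [PySem.List.pyRange, PySem.List.pyGet?, PySem.List.pyIdx?]
  simp [scanValues_eq, List.range_succ, Svals]
  generalize (x == "202101") = a1
  generalize (x == "202102") = a2
  generalize (x == "202103") = a3
  generalize (x == "202104") = a4
  generalize (x == "202105") = a5
  generalize (x == "Arief Kurniawan") = b1
  generalize (x == "Sharon Kurniawan") = b2
  generalize (x == "Stephanie Anastasia") = b3
  generalize (x == "Stella Windaya") = b4
  generalize (x == "Indah Windaya") = b5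
  cases a1 <;> cases a2 <;> cases a3 <;> cases a4 <;> cases a5 <;>
    cases b1 <;> cases b2 <;> cases b3 <;> cases b4 <;> cases b5 <;> rfl
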